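-- pv_equiv track=rewrite | github.com/ualberta-smr/PyMigBench | code/v2/pymigstat/runnables/convert_pymigbench_data.py | parse_migbench_lines
-- ===== SOURCE A (Python) =====
-- def parse_migbench_lines(line: str):
--     lines = []
--     parts = line.split(",")
--     for part in parts:
--         if ":" in part:
--             for subpart in part.split(":"):
--                 lines += parse_migbench_lines(subpart)
--         elif "-" in part:
--             start, end = part.split("-")
--             lines += list(range(int(start), int(end) + 1))
--         else:
--             lines += [int(part)]
--
--     return lines
-- ===== SOURCE B (Python) =====
-- def parse_migbench_lines(line: str):
--     # Colons and commas are interchangeable separators, so normalize and do one flat pass.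
--     lines = []
--     for token in line.replace(":", ",").split(","):
--         if "-" in token:
--             start, end = token.split("-")
--             lines.extend(range(int(start), int(end) + 1))
--         else:
--             lines.append(int(token))
--     return lines
-- ===== Notes on version B (the rewrite author's own statement) =====
-- stated objective: simpler
-- what changed: Replaces A's recursive two-level parse (recursing on each colon-separated subpart) by normalizing ':' to ',' once and running a single flat loop over the tokens with two branches (range or single int).
import Mathlib
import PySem

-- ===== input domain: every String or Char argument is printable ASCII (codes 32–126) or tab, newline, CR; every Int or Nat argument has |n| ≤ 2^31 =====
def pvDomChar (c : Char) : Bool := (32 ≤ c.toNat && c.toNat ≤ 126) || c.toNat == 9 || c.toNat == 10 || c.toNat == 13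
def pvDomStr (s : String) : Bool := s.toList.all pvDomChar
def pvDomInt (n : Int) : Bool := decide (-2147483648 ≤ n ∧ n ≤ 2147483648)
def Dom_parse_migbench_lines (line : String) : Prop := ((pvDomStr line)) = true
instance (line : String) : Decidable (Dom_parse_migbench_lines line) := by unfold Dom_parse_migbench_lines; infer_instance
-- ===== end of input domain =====

-- B replaces A's recursive two-level parse by normalizing ':' to ',' once and running one flat loop over the tokens (objective: simpler).

-- ===== PORT A =====
-- 'for subpart in part.split(":"): lines += parse_migbench_lines(subpart)'
def pvSubLoopA (rec : List Char → List Int) (lines : List Int) : List (List Char) → List Int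
  | [] => lines
  | sp :: rest => pvSubLoopA rec (lines ++ rec sp) rest

-- 'for part in parts: …'
def pvPartLoopA (rec : List Char → List Int) (lines : List Int) : List (List Char) → List Int
  | [] => lines
  | part :: rest =>
    pvPartLoopA rec
      (if PySem.Chars.isIn [':'] part then
        pvSubLoopA rec lines (PySem.Chars.splitOn part [':'])
      else if PySem.Chars.isIn ['-'] part then
        match PySem.Chars.splitOn part ['-'] with
        | [s, e] => lines ++ PySem.List.pyRange ((PySem.Int.ofChars? s).getD 0) ((PySem.Int.ofChars? e).getD 0 + 1) 1
        | _ => lines  -- Python raises ValueError (unpack) here; outside Pre_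
      else lines ++ [(PySem.Int.ofChars? part).getD 0])  -- ofChars? = none is int()'s ValueError; outside Pre_
      rest

-- the recursion of A; fuel 2 is exact: pieces of a ':'-split contain no ':', so the ':' branch
-- never fires in a recursive call and Python's recursion depth is ≤ 2 on every input
def pvParseA : Nat → List Char → List Int
  | 0, _ => []
  | fuel + 1, line => pvPartLoopA (pvParseA fuel) [] (PySem.Chars.splitOn line [','])

def parse_migbench_lines (line : String) : List Int := pvParseA 2 line.toList

-- ===== PORT B =====
def parse_migbench_lines_alt (line : String) : List Int :=
  (PySem.Chars.splitOn (PySem.Chars.replace line.toList [':'] [',']) [',']).foldl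
    (fun lines token =>
      if PySem.Chars.isIn ['-'] token then
        match PySem.Chars.splitOn token ['-'] with
        | [s, e] => lines ++ PySem.List.pyRange ((PySem.Int.ofChars? s).getD 0) ((PySem.Int.ofChars? e).getD 0 + 1) 1
        | _ => lines  -- Python raises ValueError (unpack) here; outside Pre_
      else lines ++ [(PySem.Int.ofChars? token).getD 0]) []

-- ===== PRECONDITION & SPEC =====
-- a single separator-free token parses without a ValueError
def pvTokOk (tok : List Char) : Bool :=
  if PySem.Chars.isIn ['-'] tok then
    match PySem.Chars.splitOn tok ['-'] with
    | [s, e] => (PySem.Int.ofChars? s).isSome && (PySem.Int.ofChars? e).isSome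
    | _ => false
  else (PySem.Int.ofChars? tok).isSome

-- Pre_ = exactly the inputs where Python A returns normally: every ','/':'-separated token is
-- either a well-formed 'a-b' range or an int literal (otherwise int()/unpacking raises ValueError)
def Pre_parse_migbench_lines (line : String) : Prop :=
  ∀ tok ∈ PySem.Chars.splitOn (PySem.Chars.replace line.toList [':'] [',']) [','], pvTokOk tok = true

instance (line : String) : Decidable (Pre_parse_migbench_lines line) := by
  unfold Pre_parse_migbench_lines; infer_instance

def pvWitness_parse_migbench_lines : String := "1,3-5:7"

def Spec_parse_migbench_lines (line : String) (out : List Int) : Prop := out = parse_migbench_lines_alt line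
instance (line : String) (out : List Int) : Decidable (Spec_parse_migbench_lines line out) := by unfold Spec_parse_migbench_lines; infer_instance

-- ===== CLAIM (what is proved, stated in full; the proofs are below) =====
def Claim_equal_parse_migbench_lines : Prop := ∀ (line : String), Dom_parse_migbench_lines line → Pre_parse_migbench_lines line → Spec_parse_migbench_lines line (parse_migbench_lines line)

-- ===== LEMMAS AND PROOFS =====

-- a simple structural single-character splitter used only in the proofs
def pvSplit1 (c : Char) : List Char → List (List Char)
  | [] => [[]]
  | d :: rest =>
    if d = c then [] :: pvSplit1 c rest
    else
      match pvSplit1 c rest with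
      | [] => [[d]]
      | h :: t => (d :: h) :: t

def pvConsFirst (x : List Char) : List (List Char) → List (List Char)
  | [] => [x]
  | h :: t => (x ++ h) :: t

-- the single token handler both programs share at the leaves
def pvHandleTok (tok : List Char) : List Int :=
  if PySem.Chars.isIn ['-'] tok then
    match PySem.Chars.splitOn tok ['-'] with
    | [s, e] => PySem.List.pyRange ((PySem.Int.ofChars? s).getD 0) ((PySem.Int.ofChars? e).getD 0 + 1) 1
    | _ => []
  else [(PySem.Int.ofChars? tok).getD 0]

def pvBodyA (rec : List Char → List Int) (part : List Char) : List Int :=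
  if PySem.Chars.isIn [':'] part then (PySem.Chars.splitOn part [':']).flatMap rec
  else pvHandleTok part

theorem pvSplit1_ne_nil (c : Char) (l : List Char) : pvSplit1 c l ≠ [] := by
  cases l with
  | nil => simp [pvSplit1]
  | cons d rest =>
    simp only [pvSplit1]
    split
    · simp
    · split <;> simp

theorem pvGo_eq (c : Char) (fuel : Nat) : ∀ (l cur : List Char) (acc : List (List Char)),
    l.length < fuel →
    PySem.Chars.splitOn.go [c] fuel l cur acc
      = acc.reverse ++ pvConsFirst cur.reverse (pvSplit1 c l) := by
  induction fuel with
  | zero => intro l cur acc h; omega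
  | succ f ih =>
    intro l cur acc h
    cases l with
    | nil => simp [PySem.Chars.splitOn.go, pvSplit1, pvConsFirst]
    | cons d rest =>
      rw [PySem.Chars.splitOn.go]
      by_cases hdc : d = c
      · subst hdc
        have hpre : [d].isPrefixOf (d :: rest) = true := by simp [List.isPrefixOf]
        rw [if_pos hpre]
        rw [ih _ _ _ (by simpa using Nat.lt_of_succ_lt_succ h)]
        rcases hsp : pvSplit1 d rest with _ | ⟨hh, tt⟩
        · exact absurd hsp (pvSplit1_ne_nil d rest)
        · simp [pvSplit1, pvConsFirst, hsp]
      · have hpre : [c].isPrefixOf (d :: rest) = false := by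
          simp [List.isPrefixOf]
          intro hh; exact absurd hh.symm hdc
        rw [if_neg (by simp [hpre])]
        rw [ih _ _ _ (by simpa using Nat.lt_of_succ_lt_succ h)]
        rcases hsp : pvSplit1 c rest with _ | ⟨hh, tt⟩
        · exact absurd hsp (pvSplit1_ne_nil c rest)
        · simp [pvSplit1, pvConsFirst, hdc, hsp]

theorem pvSplitOn_eq (c : Char) (l : List Char) :
    PySem.Chars.splitOn l [c] = pvSplit1 c l := by
  unfold PySem.Chars.splitOn
  rw [pvGo_eq c (l.length + 1) l [] [] (by omega)]
  rcases hsp : pvSplit1 c l with _ | ⟨hh, tt⟩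
  · exact absurd hsp (pvSplit1_ne_nil c l)
  · simp [pvConsFirst]

theorem pvRepGo_eq (a b : Char) (fuel : Nat) : ∀ (l acc : List Char), l.length ≤ fuel →
    PySem.Chars.replace.go [a] [b] fuel l acc
      = acc.reverse ++ l.map (fun d => if d = a then b else d) := by
  induction fuel with
  | zero =>
    intro l acc h
    have : l = [] := by cases l <;> simp_all
    subst this
    simp [PySem.Chars.replace.go]
  | succ f ih =>
    intro l acc h
    cases l with
    | nil => simp [PySem.Chars.replace.go]
    | cons d rest =>
      rw [PySem.Chars.replace.go]
      by_cases hda : d = a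
      · subst hda
        have hpre : [d].isPrefixOf (d :: rest) = true := by simp [List.isPrefixOf]
        rw [if_pos hpre]
        rw [ih _ _ (by simpa using Nat.le_of_succ_le_succ h)]
        simp
      · have hpre : [a].isPrefixOf (d :: rest) = false := by
          simp [List.isPrefixOf]
          intro hh; exact absurd hh.symm hda
        rw [if_neg (by simp [hpre])]
        rw [ih _ _ (by simpa using Nat.le_of_succ_le_succ h)]
        simp [hda]

theorem pvReplace_eq (a b : Char) (l : List Char) :
    PySem.Chars.replace l [a] [b] = l.map (fun d => if d = a then b else d) := by
  unfold PySem.Chars.replace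
  rw [if_neg (by simp)]
  rw [pvRepGo_eq a b l.length l [] le_rfl]
  simp

theorem pvIsIn_single_true (c : Char) (l : List Char) :
    PySem.Chars.isIn [c] l = true ↔ c ∈ l := by
  rw [PySem.Chars.isIn_iff_infix]
  constructor
  · rintro ⟨s, t, rfl⟩; simp
  · intro hm
    rcases List.append_of_mem hm with ⟨s, t, rfl⟩
    exact ⟨s, t, by simp⟩

theorem pvMem_split1_not_mem (c : Char) : ∀ (l sp : List Char), sp ∈ pvSplit1 c l → c ∉ sp := by
  intro l
  induction l with
  | nil => intro sp h; simp [pvSplit1] at h; simp [h]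
  | cons d rest ih =>
    intro sp h
    simp only [pvSplit1] at h
    by_cases hdc : d = c
    · rw [if_pos hdc] at h
      rcases List.mem_cons.mp h with h | h
      · simp [h]
      · exact ih sp h
    · rw [if_neg hdc] at h
      rcases hsp : pvSplit1 c rest with _ | ⟨hh, tt⟩
      · exact absurd hsp (pvSplit1_ne_nil c rest)
      · rw [hsp] at h
        rcases List.mem_cons.mp h with h | h
        · subst h
          intro hmem
          rcases List.mem_cons.mp hmem with h1 | h1
          · exact hdc h1.symm
          · exact ih hh (by rw [hsp]; exact List.mem_cons_self) h1
        · exact ih sp (by rw [hsp]; exact List.mem_cons_of_mem _ h)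

theorem pvMem_split1_subset (c : Char) : ∀ (l sp : List Char), sp ∈ pvSplit1 c l → ∀ x ∈ sp, x ∈ l := by
  intro l
  induction l with
  | nil => intro sp h; simp [pvSplit1] at h; simp [h]
  | cons d rest ih =>
    intro sp h x hx
    simp only [pvSplit1] at h
    by_cases hdc : d = c
    · rw [if_pos hdc] at h
      rcases List.mem_cons.mp h with h | h
      · simp [h] at hx
      · exact List.mem_cons_of_mem _ (ih sp h x hx)
    · rw [if_neg hdc] at h
      rcases hsp : pvSplit1 c rest with _ | ⟨hh, tt⟩
      · exact absurd hsp (pvSplit1_ne_nil c rest)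
      · rw [hsp] at h
        rcases List.mem_cons.mp h with h | h
        · subst h
          rcases List.mem_cons.mp hx with h1 | h1
          · simp [h1]
          · exact List.mem_cons_of_mem _ (ih hh (by rw [hsp]; exact List.mem_cons_self) x h1)
        · exact List.mem_cons_of_mem _ (ih sp (by rw [hsp]; exact List.mem_cons_of_mem _ h) x hx)

theorem pvSplit1_of_not_mem (c : Char) : ∀ (l : List Char), c ∉ l → pvSplit1 c l = [l] := by
  intro l
  induction l with
  | nil => intro _; rfl
  | cons d rest ih =>
    intro h
    have hdc : d ≠ c := fun hh => h (by simp [hh])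
    have hrest : c ∉ rest := fun hh => h (List.mem_cons_of_mem _ hh)
    simp only [pvSplit1, if_neg hdc, ih hrest]

theorem pvSplit1_swap : ∀ (l : List Char),
    pvSplit1 ',' (l.map (fun d => if d = ':' then ',' else d))
      = (pvSplit1 ',' l).flatMap (pvSplit1 ':') := by
  intro l
  induction l with
  | nil => simp [pvSplit1]
  | cons d rest ih =>
    simp only [List.map_cons]
    by_cases hcomma : d = ','
    · subst hcomma
      rw [if_neg (by decide)]
      simp only [pvSplit1]
      rw [ih]
      simp [pvSplit1]
    · by_cases hcolon : d = ':'
      · subst hcolon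
        rw [if_pos rfl]
        simp only [pvSplit1, if_neg (by decide : ¬(':' = ','))]
        rcases hsp : pvSplit1 ',' rest with _ | ⟨hh, tt⟩
        · exact absurd hsp (pvSplit1_ne_nil ',' rest)
        · rw [hsp] at ih
          simp only [List.flatMap_cons] at ih ⊢
          rw [ih]
          simp only [pvSplit1]
          rcases hsp2 : pvSplit1 ':' hh with _ | ⟨h2, t2⟩
          · exact absurd hsp2 (pvSplit1_ne_nil ':' hh)
          · simp
      · rw [if_neg hcolon]
        simp only [pvSplit1, if_neg hcomma]
        rcases hsp : pvSplit1 ',' rest with _ | ⟨hh, tt⟩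
        · exact absurd hsp (pvSplit1_ne_nil ',' rest)
        · rw [hsp] at ih
          simp only [List.flatMap_cons] at ih ⊢
          rcases hsp2 : pvSplit1 ',' (rest.map (fun d => if d = ':' then ',' else d)) with _ | ⟨h3, t3⟩
          · exact absurd hsp2 (pvSplit1_ne_nil ',' _)
          · rw [hsp2] at ih
            simp only [pvSplit1, if_neg hcolon]
            rcases hsp3 : pvSplit1 ':' hh with _ | ⟨h4, t4⟩
            · exact absurd hsp3 (pvSplit1_ne_nil ':' hh)
            · rw [hsp3] at ih
              simp only [List.cons_append] at ih
              -- ih : h3 :: t3 = (':'-split of hh head) stuff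
              cases ih
              simp

theorem pvSubLoopA_eq (rec : List Char → List Int) : ∀ (sps : List (List Char)) (lines : List Int),
    pvSubLoopA rec lines sps = lines ++ sps.flatMap rec := by
  intro sps
  induction sps with
  | nil => intro lines; simp [pvSubLoopA]
  | cons sp rest ih => intro lines; simp [pvSubLoopA, ih]

theorem pvPartLoopA_eq (rec : List Char → List Int) : ∀ (parts : List (List Char)) (lines : List Int),
    pvPartLoopA rec lines parts = lines ++ parts.flatMap (pvBodyA rec) := by
  intro parts
  induction parts with
  | nil => intro lines; simp [pvPartLoopA]
  | cons part rest ih =>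
    intro lines
    have hstep :
        (if PySem.Chars.isIn [':'] part then
          pvSubLoopA rec lines (PySem.Chars.splitOn part [':'])
        else if PySem.Chars.isIn ['-'] part then
          match PySem.Chars.splitOn part ['-'] with
          | [s, e] => lines ++ PySem.List.pyRange ((PySem.Int.ofChars? s).getD 0) ((PySem.Int.ofChars? e).getD 0 + 1) 1
          | _ => lines
        else lines ++ [(PySem.Int.ofChars? part).getD 0])
          = lines ++ pvBodyA rec part := by
      by_cases hc : PySem.Chars.isIn [':'] part = true
      · simp [hc, pvBodyA, pvSubLoopA_eq]
      · simp only [Bool.not_eq_true] at hc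
        by_cases hd : PySem.Chars.isIn ['-'] part = true
        · simp only [pvBodyA, pvHandleTok, hc, hd, Bool.false_eq_true, if_false, if_true]
          rcases PySem.Chars.splitOn part ['-'] with _ | ⟨s, _ | ⟨e, _ | ⟨x, r⟩⟩⟩ <;> simp
        · simp only [Bool.not_eq_true] at hd
          simp [pvBodyA, pvHandleTok, hc, hd]
    rw [pvPartLoopA, hstep, ih]
    simp

theorem pvFoldB_eq : ∀ (toks : List (List Char)) (lines : List Int),
    toks.foldl (fun lines token =>
      if PySem.Chars.isIn ['-'] token then
        match PySem.Chars.splitOn token ['-'] with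
        | [s, e] => lines ++ PySem.List.pyRange ((PySem.Int.ofChars? s).getD 0) ((PySem.Int.ofChars? e).getD 0 + 1) 1
        | _ => lines
      else lines ++ [(PySem.Int.ofChars? token).getD 0]) lines
      = lines ++ toks.flatMap pvHandleTok := by
  intro toks
  induction toks with
  | nil => intro lines; simp
  | cons tok rest ih =>
    intro lines
    have hstep :
        (if PySem.Chars.isIn ['-'] tok then
          match PySem.Chars.splitOn tok ['-'] with
          | [s, e] => lines ++ PySem.List.pyRange ((PySem.Int.ofChars? s).getD 0) ((PySem.Int.ofChars? e).getD 0 + 1) 1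
          | _ => lines
        else lines ++ [(PySem.Int.ofChars? tok).getD 0])
          = lines ++ pvHandleTok tok := by
      by_cases hd : PySem.Chars.isIn ['-'] tok = true
      · simp only [pvHandleTok, hd, if_true]
        rcases PySem.Chars.splitOn tok ['-'] with _ | ⟨s, _ | ⟨e, _ | ⟨x, r⟩⟩⟩ <;> simp
      · simp only [Bool.not_eq_true] at hd
        simp [pvHandleTok, hd]
    rw [List.foldl_cons, hstep, ih]
    simp

theorem pvIsIn_single_false (c : Char) (l : List Char) (h : c ∉ l) :
    PySem.Chars.isIn [c] l = false := by
  rcases hb : PySem.Chars.isIn [c] l with _ | _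
  · rfl
  · exact absurd ((pvIsIn_single_true c l).mp hb) h

theorem pvParseA_leaf (f : Nat) (tok : List Char) (hcomma : ',' ∉ tok) (hcolon : ':' ∉ tok) :
    pvParseA (f + 1) tok = pvHandleTok tok := by
  rw [pvParseA, pvSplitOn_eq, pvSplit1_of_not_mem ',' tok hcomma, pvPartLoopA_eq]
  simp [pvBodyA, pvIsIn_single_false ':' tok hcolon]

theorem pvParse_eq_alt (line : String) :
    parse_migbench_lines line = parse_migbench_lines_alt line := by
  unfold parse_migbench_lines parse_migbench_lines_alt
  rw [pvReplace_eq, pvSplitOn_eq, pvFoldB_eq, pvSplit1_swap, List.nil_append]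
  show pvParseA 2 line.toList = _
  rw [pvParseA, pvSplitOn_eq, pvPartLoopA_eq, List.nil_append, List.flatMap_assoc]
  apply List.flatMap_congr
  intro part hpart
  have hcomma : ',' ∉ part := pvMem_split1_not_mem ',' line.toList part hpart
  by_cases hc : ':' ∈ part
  · simp only [pvBodyA, (pvIsIn_single_true ':' part).mpr hc, if_true]
    rw [pvSplitOn_eq]
    apply List.flatMap_congr
    intro sp hsp
    exact pvParseA_leaf 0 sp
      (fun hm => hcomma (pvMem_split1_subset ':' part sp hsp ',' hm))
      (pvMem_split1_not_mem ':' part sp hsp)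
  · simp only [pvBodyA, pvIsIn_single_false ':' part hc, Bool.false_eq_true, if_false]
    rw [pvSplit1_of_not_mem ':' part hc]
    simp

-- ===== VERDICT (by name: the statement is the Claim_ definition above) =====
theorem parse_migbench_lines_spec : Claim_equal_parse_migbench_lines := by
  intro line _ _
  unfold Spec_parse_migbench_lines
  exact pvParse_eq_alt line
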